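-- pv_equiv track=rewrite | github.com/siimveske/AOC | 2021/day03/day_03_binary_diagnostic.py | filter_oxygen_rating
-- ===== SOURCE A (Python) =====
-- def find_counts(report: list, bit_index: int):
--     result = [0, 0]
--     for item in report:
--         result[int(item[bit_index])] += 1
--     return result
--
-- def filter_oxygen_rating(report: list, index: int):
--     result = []
--     cnt_0, cnt_1 = find_counts(report, index)
--     for item in report:
--         if (cnt_0 > cnt_1) and item[index] == '0':
--             result.append(item)
--         elif (cnt_1 > cnt_0) and item[index] == '1':
--             result.append(item)
--         elif (cnt_0 == cnt_1) and item[index] == '1':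
--             result.append(item)
--     return result
-- ===== SOURCE B (Python) =====
-- def filter_oxygen_rating(report: list, index: int):
--     zeros, ones = [], []
--     for item in report:
--         (zeros if item[index] == '0' else ones).append(item)
--     return ones if len(ones) >= len(zeros) else zeros
-- ===== Notes on version B (the rewrite author's own statement) =====
-- stated objective: simpler
-- what changed: Replaces the two-pass count-then-filter (helper counting via int(ch) list indexing, then a three-branch filter loop) by a single bucketing pass into zeros/ones lists followed by a constant-time selection of the larger bucket (ones on ties).
import Mathlib
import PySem

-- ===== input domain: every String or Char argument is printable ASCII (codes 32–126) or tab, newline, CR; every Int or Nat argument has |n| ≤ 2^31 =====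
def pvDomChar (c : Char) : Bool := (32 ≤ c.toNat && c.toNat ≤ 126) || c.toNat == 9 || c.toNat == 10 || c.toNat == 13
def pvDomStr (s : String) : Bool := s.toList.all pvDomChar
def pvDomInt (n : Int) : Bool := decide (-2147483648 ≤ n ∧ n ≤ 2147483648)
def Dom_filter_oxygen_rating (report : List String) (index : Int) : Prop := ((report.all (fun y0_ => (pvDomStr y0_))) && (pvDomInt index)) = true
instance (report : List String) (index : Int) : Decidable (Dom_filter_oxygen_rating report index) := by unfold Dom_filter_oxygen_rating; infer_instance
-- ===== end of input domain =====

-- B changes the decomposition (one bucketing pass + bucket selection instead of count-then-filter); equivalence is proved on inputs where A returns (every item's char at index is '0' or '1').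

-- ===== PORT A =====
-- find_counts: result = [0,0]; result[int(item[bit_index])] += 1.  The 2-list is
-- represented by the pair (result[0], result[1]); on a char other than '0'/'1'
-- Python raises (ValueError/IndexError), excluded by Pre_, state left unchanged.
def find_counts (report : List String) (bit_index : Int) : Int × Int :=
  report.foldl (fun r item =>
    match PySem.Str.pyGet? item bit_index with
    | some '0' => (r.1 + 1, r.2)
    | some '1' => (r.1, r.2 + 1)
    | _ => r) (0, 0)

def filter_oxygen_rating (report : List String) (index : Int) : List String :=
  let c := find_counts report index
  report.foldl (fun result item =>
    if c.1 > c.2 ∧ PySem.Str.pyGet? item index = some '0' then result ++ [item]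
    else if c.2 > c.1 ∧ PySem.Str.pyGet? item index = some '1' then result ++ [item]
    else if c.1 = c.2 ∧ PySem.Str.pyGet? item index = some '1' then result ++ [item]
    else result) []

-- ===== PORT B =====
def filter_oxygen_rating_alt (report : List String) (index : Int) : List String :=
  let p := report.foldl (fun (p : List String × List String) item =>
    if PySem.Str.pyGet? item index = some '0' then (p.1 ++ [item], p.2)
    else (p.1, p.2 ++ [item])) ([], [])
  if p.2.length ≥ p.1.length then p.2 else p.1

-- ===== PRECONDITION & SPEC =====
-- Pre_ excludes exactly the inputs on which A raises: some item too short for the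
-- index (IndexError) or whose character there is not '0'/'1' (ValueError/IndexError
-- from result[int(ch)]).
def Pre_filter_oxygen_rating (report : List String) (index : Int) : Prop :=
  ∀ item ∈ report, PySem.Str.pyGet? item index = some '0' ∨ PySem.Str.pyGet? item index = some '1'
instance (report : List String) (index : Int) : Decidable (Pre_filter_oxygen_rating report index) := by unfold Pre_filter_oxygen_rating; infer_instance

def pvWitness_filter_oxygen_rating : List String × Int := (["10", "11", "01"], 0)

def Spec_filter_oxygen_rating (report : List String) (index : Int) (out : List String) : Prop := out = filter_oxygen_rating_alt report index
instance (report : List String) (index : Int) (out : List String) : Decidable (Spec_filter_oxygen_rating report index out) := by unfold Spec_filter_oxygen_rating; infer_instance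

-- ===== CLAIM (what is proved, stated in full; the proofs are below) =====
def Claim_equal_filter_oxygen_rating : Prop := ∀ (report : List String) (index : Int), Dom_filter_oxygen_rating report index → Pre_filter_oxygen_rating report index → Spec_filter_oxygen_rating report index (filter_oxygen_rating report index)

-- ===== LEMMAS AND PROOFS =====

-- generalized-accumulator invariant for A's counting loop
theorem find_counts_go (report : List String) (index : Int)
    (h : ∀ item ∈ report, PySem.Str.pyGet? item index = some '0' ∨ PySem.Str.pyGet? item index = some '1')
    (a b : Int) :
    report.foldl (fun r item =>
      match PySem.Str.pyGet? item index with
      | some '0' => (r.1 + 1, r.2)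
      | some '1' => (r.1, r.2 + 1)
      | _ => r) (a, b) =
      (a + ((report.filter (fun s => PySem.Str.pyGet? s index = some '0')).length : Int),
       b + ((report.filter (fun s => PySem.Str.pyGet? s index = some '1')).length : Int)) := by
  induction report generalizing a b with
  | nil => simp
  | cons x xs ih =>
    have hx := h x (by simp)
    have hxs : ∀ item ∈ xs, PySem.Str.pyGet? item index = some '0' ∨ PySem.Str.pyGet? item index = some '1' :=
      fun item hm => h item (by simp [hm])
    rw [List.foldl_cons, List.filter_cons, List.filter_cons]
    rcases hx with hx | hx <;>
      rw [hx] <;> simp only [] <;> rw [ih hxs] <;> simp [hx] <;> ring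

-- characterisation of A's counter as counts of the two filters
theorem find_counts_eq (report : List String) (index : Int)
    (h : Pre_filter_oxygen_rating report index) :
    find_counts report index =
      (((report.filter (fun s => PySem.Str.pyGet? s index = some '0')).length : Int),
       ((report.filter (fun s => PySem.Str.pyGet? s index = some '1')).length : Int)) := by
  unfold find_counts
  simpa using find_counts_go report index h 0 0

-- B's bucketing pass is the pair of filters
theorem buckets_eq (report : List String) (index : Int) :
    report.foldl (fun (p : List String × List String) item =>
      if PySem.Str.pyGet? item index = some '0' then (p.1 ++ [item], p.2)
      else (p.1, p.2 ++ [item])) ([], []) =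
      (report.filter (fun s => PySem.Str.pyGet? s index = some '0'),
       report.filter (fun s => ¬ PySem.Str.pyGet? s index = some '0')) := by
  suffices h : ∀ (z o : List String),
      report.foldl (fun (p : List String × List String) item =>
        if PySem.Str.pyGet? item index = some '0' then (p.1 ++ [item], p.2)
        else (p.1, p.2 ++ [item])) (z, o) =
      (z ++ report.filter (fun s => PySem.Str.pyGet? s index = some '0'),
       o ++ report.filter (fun s => ¬ PySem.Str.pyGet? s index = some '0')) by
    simpa using h [] []
  induction report with
  | nil => simp
  | cons x xs ih =>
    intro z o
    rw [List.foldl_cons, List.filter_cons, List.filter_cons]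
    by_cases hx : PySem.Str.pyGet? x index = some '0'
    · rw [if_pos hx, ih]
      simp at hx
      simp [hx]
    · rw [if_neg hx, ih]
      simp at hx
      simp [hx]

-- A's filter loop selects the '0'-filter when c0 > c1 and the '1'-filter otherwise
theorem A_fold_char (report : List String) (index : Int) (c0 c1 : Int) :
    report.foldl (fun result item =>
      if c0 > c1 ∧ PySem.Str.pyGet? item index = some '0' then result ++ [item]
      else if c1 > c0 ∧ PySem.Str.pyGet? item index = some '1' then result ++ [item]
      else if c0 = c1 ∧ PySem.Str.pyGet? item index = some '1' then result ++ [item]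
      else result) [] =
      if c0 > c1 then report.filter (fun s => PySem.Str.pyGet? s index = some '0')
      else report.filter (fun s => PySem.Str.pyGet? s index = some '1') := by
  by_cases h : c0 > c1
  · rw [if_pos h]
    have hbody : (fun (result : List String) item =>
        if c0 > c1 ∧ PySem.Str.pyGet? item index = some '0' then result ++ [item]
        else if c1 > c0 ∧ PySem.Str.pyGet? item index = some '1' then result ++ [item]
        else if c0 = c1 ∧ PySem.Str.pyGet? item index = some '1' then result ++ [item]
        else result) =
        (fun result item => if PySem.Str.pyGet? item index = some '0' then result ++ [item] else result) := by
      funext result item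
      have h2 : ¬ (c1 > c0 ∧ PySem.Str.pyGet? item index = some '1') := fun hc => absurd h (by omega)
      have h3 : ¬ (c0 = c1 ∧ PySem.Str.pyGet? item index = some '1') := fun hc => absurd h (by omega)
      by_cases hp : PySem.Str.pyGet? item index = some '0'
      · rw [if_pos ⟨h, hp⟩, if_pos hp]
      · rw [if_neg (fun hc => hp hc.2), if_neg h2, if_neg h3, if_neg hp]
    rw [hbody, PySem.List.foldl_append_ite_eq_filter]
    simp
  · rw [if_neg h]
    have hbody : (fun (result : List String) item =>
        if c0 > c1 ∧ PySem.Str.pyGet? item index = some '0' then result ++ [item]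
        else if c1 > c0 ∧ PySem.Str.pyGet? item index = some '1' then result ++ [item]
        else if c0 = c1 ∧ PySem.Str.pyGet? item index = some '1' then result ++ [item]
        else result) =
        (fun result item => if PySem.Str.pyGet? item index = some '1' then result ++ [item] else result) := by
      funext result item
      have h1 : ¬ (c0 > c1 ∧ PySem.Str.pyGet? item index = some '0') := fun hc => h hc.1
      by_cases hp : PySem.Str.pyGet? item index = some '1'
      · rcases lt_or_eq_of_le (le_of_not_gt h) with hlt | heq
        · rw [if_neg h1, if_pos ⟨hlt, hp⟩, if_pos hp]
        · rw [if_neg h1, if_neg (fun hc => absurd hc.1 (by omega)), if_pos ⟨heq, hp⟩, if_pos hp]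
      · rw [if_neg h1, if_neg (fun hc => hp hc.2), if_neg (fun hc => hp hc.2), if_neg hp]
    rw [hbody, PySem.List.foldl_append_ite_eq_filter]
    simp

-- ===== VERDICT (by name: the statement is the Claim_ definition above) =====
theorem filter_oxygen_rating_spec : Claim_equal_filter_oxygen_rating := by
  intro report index _ hpre
  unfold Spec_filter_oxygen_rating filter_oxygen_rating filter_oxygen_rating_alt
  rw [buckets_eq, find_counts_eq report index hpre]
  simp only []
  rw [A_fold_char]
  have hones : report.filter (fun s => ¬ PySem.Str.pyGet? s index = some '0') =
      report.filter (fun s => PySem.Str.pyGet? s index = some '1') := by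
    apply List.filter_congr
    intro x hx
    rcases hpre x hx with h | h <;> simp at h <;> simp [h]
  rw [hones]
  by_cases hc : (report.filter (fun s => PySem.Str.pyGet? s index = some '1')).length ≥
      (report.filter (fun s => PySem.Str.pyGet? s index = some '0')).length
  · rw [if_pos hc, if_neg (by omega)]
  · rw [if_neg hc, if_pos (by omega)]
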